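-- pv_equiv track=rewrite | github.com/almst-mach/Mk-PT1-41-21 | Tasks/Stuk/Task_4/Task_4_2.py | recovery_debts
-- ===== SOURCE A (Python) =====
-- def recovery_debts(overpayments: dict, underpayments: dict, debts: dict) -> dict:
--     """Распределение долгов между друзьями
--
--     Args:
--         overpayments (dict): кто заплатил больше и на сколько
--         underpayments (dict): кто заплатил меньше и на сколько
--         debts (dict): кто, кому и сколько должен
--
--     Returns:
--         dict: кто, кому и сколько должен
--     """
--     for guest_max, overpayment in overpayments.items():
--         for guest_min in list(underpayments.keys()):
--             underpayment = underpayments[guest_min]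
--             if underpayment > overpayment:
--                 underpayment -= overpayment
--                 debts[(guest_min, guest_max)] = underpayment
--                 underpayments[guest_min] = underpayment
--                 break
--             elif underpayment < overpayment:
--                 overpayment -= underpayment
--                 debts[(guest_min, guest_max)] = underpayment
--                 del underpayments[guest_min]
--             else:
--                 debts[(guest_min, guest_max)] = underpayment
--                 break
--         else:
--             debts[(guest_max, guest_max)] = overpayment
--     return debts
-- ===== SOURCE B (Python) =====
-- def recovery_debts(overpayments: dict, underpayments: dict, debts: dict) -> dict:
--     """Flat two-pointer merge: one iterative loop advancing a pointer into each
--     of the two payment lists, keeping the current remainders in the lists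
--     themselves. Note: unlike the original, this does not mutate
--     `underpayments`; only the returned `debts` dict is updated in place."""
--     ov = list(overpayments.items())
--     un = list(underpayments.items())
--     i = 0
--     j = 0
--     while i < len(ov):
--         payer, credit = ov[i]
--         if j == len(un):
--             debts[(payer, payer)] = credit
--             i += 1
--             continue
--         owner, need = un[j]
--         if need <= credit:
--             debts[(owner, payer)] = need
--             if need == credit:
--                 i += 1
--             else:
--                 ov[i] = (payer, credit - need)
--                 j += 1
--         else:
--             rest = need - credit
--             un[j] = (owner, rest)
--             debts[(owner, payer)] = rest
--             i += 1
--     return debts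
-- ===== Notes on version B (the rewrite author's own statement) =====
-- stated objective: faster
-- what changed: Replaces A's nested loops (which re-list all underpayment keys and restart the inner scan for every overpayment) with a single flat iterative two-pointer merge advancing one cursor into each payment list, keeping debts as the tuple-keyed dict throughout.
import Mathlib
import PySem

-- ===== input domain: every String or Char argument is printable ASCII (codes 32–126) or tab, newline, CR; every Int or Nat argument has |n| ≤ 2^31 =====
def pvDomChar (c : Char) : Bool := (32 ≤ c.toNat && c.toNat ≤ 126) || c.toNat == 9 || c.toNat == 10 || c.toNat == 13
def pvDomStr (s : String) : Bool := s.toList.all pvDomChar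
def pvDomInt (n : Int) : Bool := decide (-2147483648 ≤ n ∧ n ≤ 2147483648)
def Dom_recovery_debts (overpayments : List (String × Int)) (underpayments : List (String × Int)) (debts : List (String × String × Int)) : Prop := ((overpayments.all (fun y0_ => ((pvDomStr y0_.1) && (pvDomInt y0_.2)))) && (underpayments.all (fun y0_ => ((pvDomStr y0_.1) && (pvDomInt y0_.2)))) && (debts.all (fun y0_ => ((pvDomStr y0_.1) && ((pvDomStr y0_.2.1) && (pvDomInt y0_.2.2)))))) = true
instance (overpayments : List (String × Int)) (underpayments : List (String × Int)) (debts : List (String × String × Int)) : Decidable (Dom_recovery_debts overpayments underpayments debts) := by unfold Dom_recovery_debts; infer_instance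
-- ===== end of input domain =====

-- B replaces A's nested loops (which re-list the underpayment keys for every overpayment) with a
-- single flat two-pointer merge over both payment lists; equivalence is about the RETURN value
-- only — A also mutates the `underpayments` argument in place, B does not (both update and
-- return `debts`).

-- ===== PORT A =====
-- Python's `debts[(a, b)] = v` on the flattened triple representation of the tuple-keyed dict
-- (exact mirror of dict assignment: overwrite in place if the key is present, else append).
def pvDebtSet (d : List (String × String × Int)) (a b : String) (v : Int) : List (String × String × Int) :=
  if d.any (fun p => p.1 == a && p.2.1 == b) then
    d.map (fun p => if p.1 == a && p.2.1 == b then (a, b, v) else p)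
  else d ++ [(a, b, v)]

-- inner `for guest_min in list(underpayments.keys()): … else: …` loop of A, with the running
-- `overpayment`, the `underpayments` dict and the `debts` list as state; returns both.
-- `underpayments[guest_min]` is ported as getD _ 0: the key comes from the snapshot and only
-- already-visited keys are deleted, so it is always present (Python never raises here).
def pvInnerA (gmax : String) : List String → Int → PySem.Dict String Int → List (String × String × Int) → PySem.Dict String Int × List (String × String × Int)
  | [], o, under, debts => (under, pvDebtSet debts gmax gmax o)            -- for-else: no break
  | gmin :: rest, o, under, debts =>
    let u := under.getD gmin 0
    if u > o then
      (under.insert gmin (u - o), pvDebtSet debts gmin gmax (u - o))       -- break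
    else if u < o then
      pvInnerA gmax rest (o - u) (under.erase gmin) (pvDebtSet debts gmin gmax u)
    else
      (under, pvDebtSet debts gmin gmax u)                                 -- break

def recovery_debts (overpayments : List (String × Int)) (underpayments : List (String × Int)) (debts : List (String × String × Int)) : List (String × String × Int) :=
  (overpayments.foldl
    (fun (st : PySem.Dict String Int × List (String × String × Int)) p =>
      pvInnerA p.1 st.1.keys p.2 st.1 st.2)
    (PySem.Dict.mk underpayments, debts)).2

-- ===== PORT B =====
-- Source B keeps `debts` as Python does: a dict keyed by the (owner, payer) tuple; the triple list of
-- the signature is packed into that representation on entry and unpacked on return.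
def pvPack (t : String × String × Int) : (String × String) × Int := ((t.1, t.2.1), t.2.2)

-- Source B's flat `while i < len(ov)` two-pointer loop: the suffixes from the two cursors are the
-- lists consumed structurally; `ov[i] = …` / `un[j] = …` are the head replacements.
def pvStep : List (String × Int) → List (String × Int) → PySem.Dict (String × String) Int → PySem.Dict (String × String) Int
  | [], _, ledger => ledger
  | (payer, credit) :: ovRest, [], ledger =>
      pvStep ovRest [] (ledger.insert (payer, payer) credit)
  | (payer, credit) :: ovRest, (owner, need) :: unRest, ledger =>
      if need ≤ credit then
        if need == credit then
          pvStep ovRest ((owner, need) :: unRest) (ledger.insert (owner, payer) need)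
        else
          pvStep ((payer, credit - need) :: ovRest) unRest (ledger.insert (owner, payer) need)
      else
        pvStep ovRest ((owner, need - credit) :: unRest) (ledger.insert (owner, payer) (need - credit))
termination_by ov un _ => ov.length + un.length
decreasing_by all_goals simp

def recovery_debts_alt (overpayments : List (String × Int)) (underpayments : List (String × Int)) (debts : List (String × String × Int)) : List (String × String × Int) :=
  (pvStep overpayments underpayments (PySem.Dict.mk (debts.map pvPack))).items.map
    (fun p => (p.1.1, p.1.2, p.2))

-- ===== PRECONDITION & SPEC =====
-- Pre_ excludes association lists whose underpayment keys repeat: they do not represent a Python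
-- dict (A's `underpayments` argument is a dict, whose keys are always distinct), so every actual
-- input of A is admitted.
def Pre_recovery_debts (_overpayments : List (String × Int)) (underpayments : List (String × Int)) (_debts : List (String × String × Int)) : Prop :=
  (underpayments.map Prod.fst).Nodup
instance (overpayments : List (String × Int)) (underpayments : List (String × Int)) (debts : List (String × String × Int)) : Decidable (Pre_recovery_debts overpayments underpayments debts) := by unfold Pre_recovery_debts; infer_instance

def pvWitness_recovery_debts : (List (String × Int)) × (List (String × Int)) × (List (String × String × Int)) :=
  ([("a", 5), ("d", 2)], [("b", 3), ("c", 4)], [])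

def Spec_recovery_debts (overpayments : List (String × Int)) (underpayments : List (String × Int)) (debts : List (String × String × Int)) (out : List (String × String × Int)) : Prop := out = recovery_debts_alt overpayments underpayments debts
instance (overpayments : List (String × Int)) (underpayments : List (String × Int)) (debts : List (String × String × Int)) (out : List (String × String × Int)) : Decidable (Spec_recovery_debts overpayments underpayments debts out) := by unfold Spec_recovery_debts; infer_instance

-- ===== CLAIM (what is proved, stated in full; the proofs are below) =====
def Claim_equal_recovery_debts : Prop := ∀ (overpayments : List (String × Int)) (underpayments : List (String × Int)) (debts : List (String × String × Int)), Dom_recovery_debts overpayments underpayments debts → Pre_recovery_debts overpayments underpayments debts → Spec_recovery_debts overpayments underpayments debts (recovery_debts overpayments underpayments debts)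

-- ===== LEMMAS AND PROOFS =====

-- Proof-only intermediate: A's inner scan for one overpayment, acting on the plain underpayment
-- suffix and the flat debts list (the common denominator of the two ports).
def pvSettle (gmax : String) : Int → List (String × Int) → List (String × String × Int) → List (String × Int) × List (String × String × Int)
  | o, [], debts => ([], pvDebtSet debts gmax gmax o)
  | o, (gmin, u) :: rest, debts =>
    if u > o then ((gmin, u - o) :: rest, pvDebtSet debts gmin gmax (u - o))
    else if u < o then pvSettle gmax (o - u) rest (pvDebtSet debts gmin gmax u)
    else ((gmin, u) :: rest, pvDebtSet debts gmin gmax u)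

-- On a dict whose head key does not recur, lookup / overwrite / delete of the head key act on the head pair.
theorem pv_getD_mk_cons_head (gmin : String) (u : Int) (rest : List (String × Int)) :
    (PySem.Dict.mk ((gmin, u) :: rest)).getD gmin 0 = u := by
  simp [PySem.Dict.getD, PySem.Dict.get?, List.find?]

theorem pv_insert_mk_cons_head (gmin : String) (u v : Int) (rest : List (String × Int))
    (h : gmin ∉ rest.map Prod.fst) :
    (PySem.Dict.mk ((gmin, u) :: rest)).insert gmin v = PySem.Dict.mk ((gmin, v) :: rest) := by
  have hc : (PySem.Dict.mk ((gmin, u) :: rest)).contains gmin = true := by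
    simp [PySem.Dict.contains_mk]
  simp only [PySem.Dict.insert, hc, if_true]
  congr 1
  simp only [List.map_cons, BEq.rfl, if_true]
  congr 1
  conv_rhs => rw [← List.map_id rest]
  apply List.map_congr_left
  intro p hp
  have hne : p.1 ≠ gmin := fun he => h (he ▸ List.mem_map_of_mem hp)
  simp [hne]

theorem pv_erase_mk_cons_head (gmin : String) (u : Int) (rest : List (String × Int))
    (h : gmin ∉ rest.map Prod.fst) :
    (PySem.Dict.mk ((gmin, u) :: rest)).erase gmin = PySem.Dict.mk rest := by
  simp only [PySem.Dict.erase]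
  congr 1
  rw [List.filter_cons_of_neg (by simp)]
  apply List.filter_eq_self.mpr
  intro p hp
  have hne : p.1 ≠ gmin := fun he => h (he ▸ List.mem_map_of_mem hp)
  simp [hne]

-- The settle scan never introduces a key: its result keys stay duplicate-free.
theorem pv_settle_nodup (gmax : String) (o : Int) (l : List (String × Int))
    (debts : List (String × String × Int)) (hnd : (l.map Prod.fst).Nodup) :
    ((pvSettle gmax o l debts).1.map Prod.fst).Nodup := by
  induction l generalizing o debts with
  | nil => simp [pvSettle]
  | cons p rest ih =>
    obtain ⟨gmin, u⟩ := p
    simp only [List.map_cons, List.nodup_cons] at hnd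
    by_cases h1 : u > o
    · simpa [pvSettle, h1, List.nodup_cons] using hnd
    · by_cases h2 : u < o
      · simpa [pvSettle, h1, h2] using ih (o - u) (pvDebtSet debts gmin gmax u) hnd.2
      · simpa [pvSettle, h1, h2, List.nodup_cons] using hnd

-- A's inner scan over the freshly listed keys of a duplicate-free dict is the settle scan.
theorem pv_inner_eq (gmax : String) (l : List (String × Int)) (o : Int)
    (debts : List (String × String × Int)) (hnd : (l.map Prod.fst).Nodup) :
    pvInnerA gmax (l.map Prod.fst) o (PySem.Dict.mk l) debts
      = (PySem.Dict.mk (pvSettle gmax o l debts).1, (pvSettle gmax o l debts).2) := by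
  induction l generalizing o debts with
  | nil => simp [pvInnerA, pvSettle]
  | cons p rest ih =>
    obtain ⟨gmin, u⟩ := p
    simp only [List.map_cons, List.nodup_cons] at hnd
    simp only [List.map_cons, pvInnerA, pvSettle, pv_getD_mk_cons_head]
    by_cases h1 : u > o
    · simp [h1, pv_insert_mk_cons_head gmin u (u - o) rest hnd.1]
    · by_cases h2 : u < o
      · simp only [h1, h2, if_false, if_true,
          pv_erase_mk_cons_head gmin u rest hnd.1]
        exact ih (o - u) (pvDebtSet debts gmin gmax u) hnd.2
      · simp [h1, h2]

-- Inserting the packed key into the packed dict is pvDebtSet on the flat triple list.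
theorem pv_pack_insert (d : List (String × String × Int)) (a b : String) (v : Int) :
    (PySem.Dict.mk (d.map pvPack)).insert (a, b) v
      = PySem.Dict.mk ((pvDebtSet d a b v).map pvPack) := by
  have hcond : ∀ t : String × String × Int,
      ((pvPack t).1 == (a, b)) = (t.1 == a && t.2.1 == b) := fun _ => rfl
  have hany : (d.map pvPack).any (fun p => p.1 == (a, b))
      = d.any (fun p => p.1 == a && p.2.1 == b) := by
    rw [List.any_map]
    simp only [Function.comp_def]
    exact congrArg (List.any d) (funext fun t => hcond t)
  by_cases hc : d.any (fun p => p.1 == a && p.2.1 == b) = true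
  · have hcon : (PySem.Dict.mk (d.map pvPack)).contains (a, b) = true := by
      rw [PySem.Dict.contains_mk, hany]; exact hc
    apply PySem.Dict.ext
    rw [PySem.Dict.items_insert_of_contains _ _ hcon]
    simp only [pvDebtSet, hc, if_true, List.map_map]
    apply List.map_congr_left
    intro t _
    simp only [Function.comp, hcond t]
    by_cases ht : (t.1 == a && t.2.1 == b) = true
    · rw [if_pos ht, if_pos ht]; simp [pvPack]
    · rw [if_neg ht, if_neg ht]
  · have hcon : (PySem.Dict.mk (d.map pvPack)).contains (a, b) = false := by
      rw [PySem.Dict.contains_mk, hany]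
      exact eq_false_of_ne_true hc
    apply PySem.Dict.ext
    rw [PySem.Dict.items_insert_of_not_contains _ _ hcon]
    simp only [pvDebtSet, hc]
    simp [pvPack]

-- One overpayment of B's flat merge is one settle scan, through the packing.
theorem pv_step_cons (gmax : String) (o : Int) (ops : List (String × Int))
    (q : List (String × Int)) (d : List (String × String × Int)) :
    pvStep ((gmax, o) :: ops) q (PySem.Dict.mk (d.map pvPack))
      = pvStep ops (pvSettle gmax o q d).1 (PySem.Dict.mk ((pvSettle gmax o q d).2.map pvPack)) := by
  induction q generalizing o d with
  | nil => rw [pvStep, pv_pack_insert]; simp [pvSettle]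
  | cons p rest ih =>
    obtain ⟨gmin, u⟩ := p
    rw [pvStep]
    by_cases h1 : u > o
    · rw [if_neg (by omega)]
      rw [pv_pack_insert]
      simp [pvSettle, h1]
    · by_cases h2 : u < o
      · rw [if_pos (by omega), if_neg (by simp; omega)]
        rw [pv_pack_insert]
        have := ih (o - u) (pvDebtSet d gmin gmax u)
        simp only [pvSettle, if_neg (by omega : ¬ u > o), if_pos h2]
        exact this
      · have he : u = o := by omega
        rw [if_pos (by omega), if_pos (by simp [he])]
        rw [pv_pack_insert]
        simp [pvSettle, h1, h2]

-- The whole fold: A's dict state stays the (mk of) the settle suffix, key-duplicate-free,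
-- and B's packed ledger stays the packed settle debts.
theorem pv_fold_eq (ops : List (String × Int)) (q : List (String × Int))
    (d : List (String × String × Int)) (hnd : (q.map Prod.fst).Nodup) :
    ops.foldl
      (fun (st : PySem.Dict String Int × List (String × String × Int)) p =>
        pvInnerA p.1 st.1.keys p.2 st.1 st.2)
      (PySem.Dict.mk q, d)
      = (PySem.Dict.mk
          (ops.foldl (fun (st : List (String × Int) × List (String × String × Int)) p =>
            pvSettle p.1 p.2 st.1 st.2) (q, d)).1,
        (ops.foldl (fun (st : List (String × Int) × List (String × String × Int)) p =>
            pvSettle p.1 p.2 st.1 st.2) (q, d)).2) := by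
  induction ops generalizing q d with
  | nil => simp
  | cons p rest ih =>
    obtain ⟨gmax, o⟩ := p
    have hk : (PySem.Dict.mk q).keys = q.map Prod.fst := by
      simp [PySem.Dict.keys]
    simp only [List.foldl_cons, hk, pv_inner_eq gmax q o d hnd]
    exact ih (pvSettle gmax o q d).1 (pvSettle gmax o q d).2 (pv_settle_nodup gmax o q d hnd)

theorem pv_step_eq (ops : List (String × Int)) (q : List (String × Int))
    (d : List (String × String × Int)) :
    pvStep ops q (PySem.Dict.mk (d.map pvPack))
      = PySem.Dict.mk
          (((ops.foldl (fun (st : List (String × Int) × List (String × String × Int)) p =>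
            pvSettle p.1 p.2 st.1 st.2) (q, d)).2).map pvPack) := by
  induction ops generalizing q d with
  | nil => simp [pvStep]
  | cons p rest ih =>
    obtain ⟨gmax, o⟩ := p
    rw [pv_step_cons, List.foldl_cons]
    exact ih (pvSettle gmax o q d).1 (pvSettle gmax o q d).2

-- ===== VERDICT (by name: the statement is the Claim_ definition above) =====
theorem pv_unpack_pack (l : List (String × String × Int)) :
    List.map ((fun p : (String × String) × Int => (p.1.1, p.1.2, p.2)) ∘ pvPack) l = l := by
  induction l with
  | nil => rfl
  | cons t rest ih => rw [List.map_cons, ih]; rfl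

theorem recovery_debts_spec : Claim_equal_recovery_debts := by
  intro overpayments underpayments debts _ hpre
  unfold Spec_recovery_debts recovery_debts recovery_debts_alt
  rw [pv_fold_eq overpayments underpayments debts hpre,
      pv_step_eq overpayments underpayments debts]
  rw [List.map_map, pv_unpack_pack]
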